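-- pv_equiv track=rewrite | github.com/LaNaGr/hdde | HDDE.py | explore_all_possibilities_1
-- ===== SOURCE A (Python) =====
-- from itertools import product
--
-- def explore_all_possibilities_1(tries, pt_Ip):
--     # for permutation, 遍历order可选的所有unit
--     all_possibilities = list(product(*[range(t) for t in tries]))
--     results = []
--     for possibility in all_possibilities:
--         result = []
--         for i, choice in enumerate(possibility):
--             order, available_units = pt_Ip[i]
--             selected_unit = available_units[choice]
--             result.append(selected_unit)
--         results.append(result)
--
--     return results
-- ===== SOURCE B (Python) =====
-- def explore_all_possibilities_1(tries, pt_Ip):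
--     # Build combinations by iterative accumulation of partial results
--     # (last dimension varies fastest, like itertools.product).
--     if any(t <= 0 for t in tries):
--         return []
--     results = [[]]
--     for i, t in enumerate(tries):
--         units = pt_Ip[i][1]
--         results = [partial + [units[c]] for partial in results for c in range(t)]
--     return results
-- ===== Notes on version B (the rewrite author's own statement) =====
-- stated objective: alternative
-- what changed: Replaces itertools.product over index ranges plus a per-tuple lookup loop with a single fold that grows a list of partial combinations, appending one selected unit per dimension; an upfront emptiness check returns [] when any dimension is empty.
import Mathlib
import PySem

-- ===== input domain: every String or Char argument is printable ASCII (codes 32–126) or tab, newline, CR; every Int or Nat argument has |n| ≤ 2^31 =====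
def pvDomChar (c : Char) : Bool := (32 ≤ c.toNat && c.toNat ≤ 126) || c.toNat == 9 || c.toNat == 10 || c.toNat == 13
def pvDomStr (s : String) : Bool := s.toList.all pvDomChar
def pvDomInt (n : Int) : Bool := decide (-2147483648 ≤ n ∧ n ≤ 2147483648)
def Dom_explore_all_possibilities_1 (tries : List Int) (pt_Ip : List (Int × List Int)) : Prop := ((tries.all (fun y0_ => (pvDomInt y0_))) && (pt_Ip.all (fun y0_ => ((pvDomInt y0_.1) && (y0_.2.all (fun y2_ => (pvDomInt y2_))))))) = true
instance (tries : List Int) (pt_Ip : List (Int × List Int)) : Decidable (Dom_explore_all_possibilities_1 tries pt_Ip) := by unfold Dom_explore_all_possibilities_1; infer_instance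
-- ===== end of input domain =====

-- B replaces itertools.product + per-tuple index lookups with a single fold accumulating
-- partial combinations (alternative decomposition, same cost).


-- ===== PORT A =====
-- itertools.product over the given index ranges (last dimension fastest)
def pvPyProduct : List (List Int) → List (List Int)
  | [] => [[]]
  | r :: rest => r.flatMap (fun a => (pvPyProduct rest).map (a :: ·))

def explore_all_possibilities_1 (tries : List Int) (pt_Ip : List (Int × List Int)) : List (List Int) :=
  let all_possibilities := pvPyProduct (tries.map (fun t => PySem.List.pyRange 0 t 1))
  all_possibilities.foldl (fun results possibility =>
    let result := (PySem.List.enumerate possibility 0).foldl (fun result ic =>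
      let available_units := (PySem.List.pyGetD pt_Ip ic.1 (0, [])).2
      let selected_unit := PySem.List.pyGetD available_units ic.2 0
      result ++ [selected_unit]) []
    results ++ [result]) []

-- ===== PORT B =====
def explore_all_possibilities_1_alt (tries : List Int) (pt_Ip : List (Int × List Int)) : List (List Int) :=
  if tries.any (fun t => decide (t ≤ 0)) then []
  else (PySem.List.enumerate tries 0).foldl (fun results it =>
      let units := (PySem.List.pyGetD pt_Ip it.1 (0, [])).2
      results.flatMap (fun part =>
        (PySem.List.pyRange 0 it.2 1).map (fun c => part ++ [PySem.List.pyGetD units c 0])))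
    [[]]

-- ===== PRECONDITION & SPEC =====
-- Pre_ excludes exactly the inputs where A raises (IndexError): all dimensions nonempty
-- while some dimension's index range exceeds pt_Ip or its unit list.
def Pre_explore_all_possibilities_1 (tries : List Int) (pt_Ip : List (Int × List Int)) : Prop :=
  (∃ t ∈ tries, t ≤ 0) ∨
  (tries.length ≤ pt_Ip.length ∧
   ∀ i < tries.length, tries.getD i 0 ≤ ((pt_Ip.getD i (0, [])).2.length : Int))
instance (tries : List Int) (pt_Ip : List (Int × List Int)) : Decidable (Pre_explore_all_possibilities_1 tries pt_Ip) := by unfold Pre_explore_all_possibilities_1; infer_instance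

def pvWitness_explore_all_possibilities_1 : List Int × (List (Int × List Int)) :=
  ([2, 1], [(0, [5, 6]), (1, [7])])

def Spec_explore_all_possibilities_1 (tries : List Int) (pt_Ip : List (Int × List Int)) (out : List (List Int)) : Prop := out = explore_all_possibilities_1_alt tries pt_Ip
instance (tries : List Int) (pt_Ip : List (Int × List Int)) (out : List (List Int)) : Decidable (Spec_explore_all_possibilities_1 tries pt_Ip out) := by unfold Spec_explore_all_possibilities_1; infer_instance

-- ===== CLAIM (what is proved, stated in full; the proofs are below) =====
def Claim_equal_explore_all_possibilities_1 : Prop := ∀ (tries : List Int) (pt_Ip : List (Int × List Int)), Dom_explore_all_possibilities_1 tries pt_Ip → Pre_explore_all_possibilities_1 tries pt_Ip → Spec_explore_all_possibilities_1 tries pt_Ip (explore_all_possibilities_1 tries pt_Ip)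

-- ===== LEMMAS AND PROOFS =====

-- selected-unit value for dimension index k and choice c
def pvVal (pt_Ip : List (Int × List Int)) (k c : Int) : Int :=
  PySem.List.pyGetD (PySem.List.pyGetD pt_Ip k (0, [])).2 c 0

-- A's inner loop as a structural recursion (index k, choices p)
def pvG (pt_Ip : List (Int × List Int)) : List Int → Int → List Int
  | [], _ => []
  | c :: p, k => pvVal pt_Ip k c :: pvG pt_Ip p (k + 1)

-- selected-unit lists from dimension k on
def pvSelLists (pt_Ip : List (Int × List Int)) : List Int → Int → List (List Int)
  | [], _ => []
  | t :: ts, k => (PySem.List.pyRange 0 t 1).map (pvVal pt_Ip k) :: pvSelLists pt_Ip ts (k + 1)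

theorem pvInner (pt_Ip : List (Int × List Int)) (p : List Int) (k : Int) (acc : List Int) :
    (PySem.List.enumerate p k).foldl (fun result ic =>
      result ++ [PySem.List.pyGetD (PySem.List.pyGetD pt_Ip ic.1 (0, [])).2 ic.2 0]) acc
    = acc ++ pvG pt_Ip p k := by
  induction p generalizing k acc with
  | nil => simp [PySem.List.enumerate_nil, pvG]
  | cons c p ih =>
      simp [PySem.List.enumerate_cons, ih, pvG, pvVal]

theorem pvOuter (pt_Ip : List (Int × List Int)) (L : List (List Int)) (acc : List (List Int)) :
    L.foldl (fun results possibility =>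
      results ++ [(PySem.List.enumerate possibility 0).foldl (fun result ic =>
        result ++ [PySem.List.pyGetD (PySem.List.pyGetD pt_Ip ic.1 (0, [])).2 ic.2 0]) []]) acc
    = acc ++ L.map (fun p => pvG pt_Ip p 0) := by
  induction L generalizing acc with
  | nil => simp
  | cons p L ih =>
      rw [List.foldl_cons, ih, pvInner]
      simp

theorem pvA_prod (pt_Ip : List (Int × List Int)) (ts : List Int) (k : Int) :
    (pvPyProduct (ts.map (fun t => PySem.List.pyRange 0 t 1))).map (fun p => pvG pt_Ip p k)
    = pvPyProduct (pvSelLists pt_Ip ts k) := by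
  induction ts generalizing k with
  | nil => simp [pvPyProduct, pvSelLists, pvG]
  | cons t ts ih =>
      simp only [List.map_cons, pvPyProduct, pvSelLists, List.map_flatMap, List.flatMap_map,
        List.map_map]
      apply List.flatMap_congr
      intro c _
      simp only [Function.comp_def, pvG]
      rw [← ih (k + 1)]
      simp [List.map_map, Function.comp_def]

theorem pvB_fold (pt_Ip : List (Int × List Int)) (ts : List Int) (k : Int) (S : List (List Int)) :
    (PySem.List.enumerate ts k).foldl (fun results it =>
      results.flatMap (fun part =>
        (PySem.List.pyRange 0 it.2 1).map (fun c =>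
          part ++ [PySem.List.pyGetD (PySem.List.pyGetD pt_Ip it.1 (0, [])).2 c 0]))) S
    = S.flatMap (fun p => (pvPyProduct (pvSelLists pt_Ip ts k)).map (p ++ ·)) := by
  induction ts generalizing k S with
  | nil => simp [PySem.List.enumerate_nil, pvSelLists, pvPyProduct]
  | cons t ts ih =>
      rw [PySem.List.enumerate_cons, List.foldl_cons, ih, List.flatMap_assoc]
      apply List.flatMap_congr
      intro p _
      simp only [pvSelLists, pvPyProduct, List.flatMap_map, List.map_flatMap, List.map_map]
      apply List.flatMap_congr
      intro c _
      simp [Function.comp_def, pvVal, List.append_assoc]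

theorem pvProd_nil_of_exists (pt_Ip : List (Int × List Int)) (ts : List Int) (k : Int)
    (h : ∃ t ∈ ts, t ≤ 0) : pvPyProduct (pvSelLists pt_Ip ts k) = [] := by
  induction ts generalizing k with
  | nil => simp at h
  | cons t ts ih =>
      rcases h with ⟨u, hu, hle⟩
      rcases List.mem_cons.mp hu with rfl | hmem
      · simp [pvSelLists, pvPyProduct, PySem.List.pyRange_one_eq_nil hle]
      · simp [pvSelLists, pvPyProduct, ih (k + 1) ⟨u, hmem, hle⟩]

-- ===== VERDICT (by name: the statement is the Claim_ definition above) =====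
theorem explore_all_possibilities_1_spec : Claim_equal_explore_all_possibilities_1 := by
  intro tries pt_Ip _ _
  unfold Spec_explore_all_possibilities_1 explore_all_possibilities_1 explore_all_possibilities_1_alt
  rw [pvOuter, pvA_prod, pvB_fold]
  by_cases h : ∃ t ∈ tries, t ≤ 0
  · rw [if_pos (by simpa using h), pvProd_nil_of_exists pt_Ip tries 0 h]
    simp
  · rw [if_neg (by simpa using h)]
    simp
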